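-- pv_equiv track=rewrite | github.com/solracq/python-lab | CodingPractice/reviews/A_review.py | compression_altr
-- ===== SOURCE A (Python) =====
-- def compression_altr(s):
--     keys = sorted(set(s))
--     sorted_s = sorted(s)
--     res = ""
--     for key in keys:
--         i = 0
--         while key in sorted_s:
--             if sorted_s[0] == key:
--                 i += 1
--                 sorted_s.remove(key)
--         res += str(i)
--         res += key
--     return res
-- ===== SOURCE B (Python) =====
-- def compression_altr(s):
--     # One linear run-scan over the sorted characters instead of A's
--     # per-key membership-test-and-remove loop.
--     t = sorted(s)
--     res = ""
--     while t:
--         c = t[0]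
--         k = 1
--         while k < len(t) and t[k] == c:
--             k += 1
--         res += str(k) + c
--         t = t[k:]
--     return res
-- ===== Notes on version B (the rewrite author's own statement) =====
-- stated objective: faster
-- what changed: Replaces A's per-distinct-key membership scans and repeated list.remove calls with a single left-to-right run scan over the sorted characters.
import Mathlib
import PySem

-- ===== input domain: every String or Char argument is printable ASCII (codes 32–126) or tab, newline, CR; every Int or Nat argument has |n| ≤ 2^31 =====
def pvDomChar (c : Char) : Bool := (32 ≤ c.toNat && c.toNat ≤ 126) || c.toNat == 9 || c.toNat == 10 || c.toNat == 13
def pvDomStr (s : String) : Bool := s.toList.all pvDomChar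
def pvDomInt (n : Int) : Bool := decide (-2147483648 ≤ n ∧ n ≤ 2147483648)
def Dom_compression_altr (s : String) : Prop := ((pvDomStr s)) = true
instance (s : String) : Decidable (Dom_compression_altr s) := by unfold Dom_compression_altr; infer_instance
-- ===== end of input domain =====

-- B replaces A's per-key membership-scan-and-remove loop with a single linear run scan
-- over the sorted characters (measurably faster on large inputs).


-- ===== PORT A =====
-- inner 'while key in sorted_s: …' loop of A; fuel = current list length (enough, since
-- each productive step removes one element).  The branch where sorted_s[0] ≠ key would
-- loop forever in Python; it is unreachable on A's reachable states (key is the minimum).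
def aInner (key : Char) : Nat → Int → List Char → Int × List Char
  | 0, i, l => (i, l)
  | fuel+1, i, l =>
      if key ∈ l then
        if PySem.List.pyGet? l 0 = some key then
          aInner key fuel (i + 1)
            (match PySem.List.remove? l key with | some l' => l' | none => l)
        else (i, l)
      else (i, l)

def compression_altr (s : String) : String :=
  let keys := PySem.List.sorted (PySem.Set.ofList s.toList) (fun x => x) false
  let sorted_s := PySem.List.sorted s.toList (fun x => x) false
  let st := keys.foldl (fun (st : List Char × List Char) key =>
      let r := aInner key st.2.length 0 st.2
      (st.1 ++ PySem.Int.toChars r.1 ++ [key], r.2)) (([] : List Char), sorted_s)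
  String.mk st.1

-- ===== PORT B =====
-- inner 'while k < len(t) and t[k] == c: k += 1'; fuel = len t (k grows past len t in ≤ len t steps)
def bRun (t : List Char) (c : Char) : Nat → Nat → Nat
  | 0, k => k
  | fuel+1, k =>
      if k < t.length ∧ PySem.List.pyGet? t (k : Int) = some c then bRun t c fuel (k + 1)
      else k

theorem bRun_ge (t : List Char) (c : Char) (fuel k : Nat) : k ≤ bRun t c fuel k := by
  induction fuel generalizing k with
  | zero => simp [bRun]
  | succ n ih =>
      simp only [bRun]
      split
      · exact le_trans (Nat.le_succ k) (ih (k + 1))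
      · exact le_refl k

-- outer 'while t: …' loop of B
def bLoop : List Char → List Char → List Char
  | [], res => res
  | c :: rest, res =>
      let k := bRun (c :: rest) c (c :: rest).length 1
      bLoop (PySem.List.slice (c :: rest) (some (k : Int))) (res ++ PySem.Int.toChars (k : Int) ++ [c])
  termination_by t _ => t.length
  decreasing_by
    have h1 : 1 ≤ bRun (c :: rest) c (c :: rest).length 1 := bRun_ge _ _ _ 1
    rw [PySem.List.slice_from _ (by positivity)]
    simp only [List.length_drop, List.length_cons, Int.toNat_natCast]
    simp only [List.length_cons] at h1 ⊢
    omega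

def compression_altr_alt (s : String) : String :=
  let t := PySem.List.sorted s.toList (fun x => x) false
  String.mk (bLoop t [])

-- ===== PRECONDITION & SPEC =====
def Spec_compression_altr (s : String) (out : String) : Prop := out = compression_altr_alt s
instance (s : String) (out : String) : Decidable (Spec_compression_altr s out) := by unfold Spec_compression_altr; infer_instance

-- ===== CLAIM (what is proved, stated in full; the proofs are below) =====
def Claim_equal_compression_altr : Prop := ∀ (s : String), Dom_compression_altr s → Spec_compression_altr s (compression_altr s)

-- ===== LEMMAS AND PROOFS =====

-- reference function: run-length encoding of an (already sorted) list, leading run by run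
def refRLE : List Char → List Char
  | [] => []
  | c :: rest =>
      let m := (rest.takeWhile (fun x => x == c)).length
      PySem.Int.toChars ((1 + m : Nat) : Int) ++ [c] ++ refRLE (rest.drop m)
  termination_by l => l.length
  decreasing_by
    simp only [List.length_drop, List.length_cons]
    have := (List.takeWhile_prefix (l := rest) (fun x => x == c)).length_le
    omega

theorem bRun_spec (t : List Char) (c : Char) (fuel j : Nat) (hf : t.length - j ≤ fuel) :
    bRun t c fuel j = j + ((t.drop j).takeWhile (fun x => x == c)).length := by
  induction fuel generalizing j with
  | zero =>
      have : t.drop j = [] := List.drop_eq_nil_of_le (by omega)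
      simp [bRun, this]
  | succ n ih =>
      simp only [bRun]
      by_cases hj : j < t.length
      · have hdrop := List.drop_eq_getElem_cons (l := t) (i := j) hj
        have hget : PySem.List.pyGet? t (j : Int) = some t[j] := by
          simp [PySem.List.pyGet?, PySem.List.pyIdx?, hj]
        by_cases hc : t[j] = c
        · have : j < t.length ∧ PySem.List.pyGet? t (j : Int) = some c := ⟨hj, by rw [hget, hc]⟩
          rw [if_pos this, ih (j + 1) (by omega), hdrop]
          simp [hc]
          omega
        · have : ¬(j < t.length ∧ PySem.List.pyGet? t (j : Int) = some c) := by
            rintro ⟨-, h⟩; rw [hget] at h; exact hc (Option.some.injEq _ _ ▸ h)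
          rw [if_neg this, hdrop, List.takeWhile_cons_of_neg (by simp [hc])]
          simp
      · have h1 : t.drop j = [] := List.drop_eq_nil_of_le (by omega)
        have : ¬(j < t.length ∧ PySem.List.pyGet? t (j : Int) = some c) := by
          rintro ⟨h, -⟩; exact hj h
        rw [if_neg this]
        simp [h1]

theorem bLoop_eq_ref (t res : List Char) : bLoop t res = res ++ refRLE t := by
  induction t, res using bLoop.induct with
  | case1 res => simp [bLoop, refRLE]
  | case2 c rest res k ih =>
      rw [bLoop]
      simp only [] at ih ⊢
      rw [ih]
      have hk : bRun (c :: rest) c (c :: rest).length 1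
          = 1 + (rest.takeWhile (fun x => x == c)).length := by
        rw [bRun_spec _ _ _ 1 (by simp)]
        simp
      set m := (rest.takeWhile (fun x => x == c)).length with hm
      have htn : ((bRun (c :: rest) c (c :: rest).length 1 : Nat) : Int).toNat = m + 1 := by
        rw [hk]; omega
      have hslice : PySem.List.slice (c :: rest)
          (some ((bRun (c :: rest) c (c :: rest).length 1 : Nat) : Int)) = rest.drop m := by
        rw [PySem.List.slice_from _ (by positivity), htn, List.drop_succ_cons]
      rw [hslice, refRLE]
      simp only [← hm, show k = 1 + m from hk, List.append_assoc]

theorem dropWhile_eq_drop_len (p : Char → Bool) (l : List Char) :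
    l.dropWhile p = l.drop (l.takeWhile p).length := by
  induction l with
  | nil => simp
  | cons a tl ih => by_cases h : p a <;> simp [List.takeWhile, List.dropWhile, h, ih]

-- A's inner loop removes exactly the leading block of `key`s, provided key occurs nowhere later
theorem aInner_run (c : Char) (m : Nat) (rest : List Char) (i : Int) (fuel : Nat)
    (hrest : c ∉ rest) (hfuel : m ≤ fuel) :
    aInner c fuel i (List.replicate m c ++ rest) = (i + (m : Int), rest) := by
  induction m generalizing i fuel with
  | zero =>
      cases fuel with
      | zero => simp [aInner]
      | succ n => simp [aInner, hrest]
  | succ k ih =>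
      cases fuel with
      | zero => omega
      | succ n =>
          have hmem : c ∈ List.replicate (k + 1) c ++ rest := by simp
          have hhead : PySem.List.pyGet? (List.replicate (k + 1) c ++ rest) 0 = some c := by
            simp [List.replicate_succ, PySem.List.pyGet?, PySem.List.pyIdx?]
            rw [if_pos (by positivity : (0:Int) ≤ (k:Int) + (rest.length:Int))]
            simp
          have hrem : PySem.List.remove? (List.replicate (k + 1) c ++ rest) c
              = some (List.replicate k c ++ rest) := by
            simp [List.replicate_succ, PySem.List.remove?_cons_self]
          rw [aInner, if_pos hmem, if_pos hhead, hrem]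
          rw [ih (i + 1) n (by omega)]
          rw [Prod.mk.injEq]
          exact ⟨by push_cast; ring, rfl⟩

-- the main simulation: A's fold over its strictly increasing key list, run against a sorted
-- remaining list containing exactly the keys' characters, produces the run-length encoding
theorem aFold_eq_ref (keys : List Char) (l : List Char) (res : List Char)
    (hsort : l.Pairwise (fun a b => a ≤ b))
    (hkeys : keys.Pairwise (fun a b => a < b))
    (hmem : ∀ x, x ∈ keys ↔ x ∈ l) :
    (keys.foldl (fun (st : List Char × List Char) key =>
        let r := aInner key st.2.length 0 st.2
        (st.1 ++ PySem.Int.toChars r.1 ++ [key], r.2)) (res, l)).1 = res ++ refRLE l := by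
  induction hn : l.length using Nat.strong_induction_on generalizing keys l res with
  | _ n ih =>
  cases l with
  | nil =>
      have : keys = [] := by
        cases keys with
        | nil => rfl
        | cons k ks => exact absurd ((hmem k).1 (List.mem_cons_self)) (by simp)
      simp [this, refRLE]
  | cons c rest =>
      -- decompose: c :: rest = replicate (m+1) c ++ rest', c ∉ rest', rest' sorted
      set m := (rest.takeWhile (fun x => x == c)).length with hmdef
      set rest' := rest.drop m with hr'
      have hdw : rest.dropWhile (fun x => x == c) = rest' := by
        rw [hr', hmdef]
        exact dropWhile_eq_drop_len _ _
      have hsplit : rest = rest.takeWhile (fun x => x == c) ++ rest' := by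
        rw [← hdw, List.takeWhile_append_dropWhile]
      have htw : rest.takeWhile (fun x => x == c) = List.replicate m c := by
        apply List.eq_replicate_of_mem
        intro b hb
        have := List.mem_takeWhile_imp hb
        simpa using this
      have hfull : c :: rest = List.replicate (m + 1) c ++ rest' := by
        rw [List.replicate_succ]
        simp only [List.cons_append, List.cons.injEq, true_and]
        rw [← htw]; exact hsplit
      have hcle : ∀ x ∈ rest, c ≤ x := by
        intro x hx; exact (List.pairwise_cons.1 hsort).1 x hx
      have hrest'sub : rest' ⊆ rest := by rw [hr']; exact List.drop_subset m rest
      have hrest'sort : rest'.Pairwise (fun a b => a ≤ b) := by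
        rw [hr']
        exact List.Pairwise.drop (List.pairwise_cons.1 hsort).2
      have hcnot : c ∉ rest' := by
        intro hc
        cases hrr : rest' with
        | nil => rw [hrr] at hc; simp at hc
        | cons d rs =>
            have hdc : d ≠ c := by
              have hne : List.dropWhile (fun x => x == c) rest ≠ [] := by
                rw [hdw.trans hrr]; simp
              have hd := List.head_dropWhile_not (fun x => x == c) hne
              simp only [hdw.trans hrr, List.head_cons] at hd
              simpa using hd
            rw [hrr] at hc
            rcases List.mem_cons.1 hc with h | h
            · exact hdc h.symm
            · have h2 : d ≤ c := (List.pairwise_cons.1 (hrr ▸ hrest'sort)).1 c h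
              have hdm : d ∈ rest := hrest'sub (by rw [hrr]; exact List.mem_cons_self)
              exact hdc (le_antisymm h2 (hcle d hdm))
      -- keys must start with c
      obtain ⟨ks, hkeq⟩ : ∃ ks, keys = c :: ks := by
        cases hkk : keys with
        | nil =>
            exact absurd ((hmem c).2 List.mem_cons_self) (by rw [hkk]; simp)
        | cons k0 ks =>
            refine ⟨ks, ?_⟩
            have hk0l : k0 ∈ c :: rest := (hmem k0).1 (by rw [hkk]; exact List.mem_cons_self)
            have h1 : c ≤ k0 := by
              rcases List.mem_cons.1 hk0l with h | h
              · exact le_of_eq h.symm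
              · exact hcle k0 h
            have hck : c ∈ k0 :: ks := by rw [← hkk]; exact (hmem c).2 List.mem_cons_self
            have h2 : k0 ≤ c := by
              rcases List.mem_cons.1 hck with h | h
              · exact le_of_eq h.symm
              · exact le_of_lt ((List.pairwise_cons.1 (hkk ▸ hkeys)).1 c h)
            rw [le_antisymm h2 h1]
      subst hkeq
      rw [List.foldl_cons]
      have hlen : (c :: rest).length = (m + 1) + rest'.length := by
        rw [hfull]; simp
      have hstep := aInner_run c (m + 1) rest' 0 ((c :: rest).length) hcnot (by omega)
      rw [← hfull] at hstep
      simp only [hstep]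
      have hks : ks.Pairwise (fun a b => a < b) := (List.pairwise_cons.1 hkeys).2
      have hmem' : ∀ x, x ∈ ks ↔ x ∈ rest' := by
        intro x
        constructor
        · intro hx
          have hxl : x ∈ c :: rest := (hmem x).1 (List.mem_cons_of_mem _ hx)
          have hxc : c < x := (List.pairwise_cons.1 hkeys).1 x hx
          rw [hfull] at hxl
          rcases List.mem_append.1 hxl with h | h
          · exact absurd (List.eq_of_mem_replicate h) (ne_of_gt hxc)
          · exact h
        · intro hx
          have hxl : x ∈ c :: rest := hfull ▸ List.mem_append_right _ hx
          have := (hmem x).2 hxl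
          rcases List.mem_cons.1 this with h | h
          · exact absurd (h ▸ hx) hcnot
          · exact h
      have hrec := ih rest'.length (by omega) ks rest'
        (res ++ PySem.Int.toChars (0 + ((m + 1 : Nat) : Int)) ++ [c])
        hrest'sort hks hmem' rfl
      rw [hrec, refRLE]
      simp only [← hmdef, ← hr', List.append_assoc]
      have hcast : (0 : Int) + ((m + 1 : Nat) : Int) = ((1 + m : Nat) : Int) := by
        push_cast; ring
      rw [hcast]

-- ===== VERDICT (by name: the statement is the Claim_ definition above) =====
theorem compression_altr_spec : Claim_equal_compression_altr := by
  intro s _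
  show compression_altr s = compression_altr_alt s
  unfold compression_altr compression_altr_alt
  dsimp only
  rw [bLoop_eq_ref]
  exact congrArg String.mk (aFold_eq_ref _ _ _
    (PySem.List.sorted_pairwise s.toList (fun x => x))
    (PySem.List.sorted_ofList_pairwise_lt s.toList)
    (fun x => by
      rw [PySem.List.mem_sorted, PySem.List.mem_sorted, PySem.Set.mem_ofList]))
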